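-- pv_equiv track=rewrite | github.com/romankurnovskii/leetcode-apps | scripts/update_problems_from_csv.py | map_topics_to_category
-- ===== SOURCE A (Python) =====
-- def map_topics_to_category(topics_str):
--     """Map Topics string to JSON category format."""
--     if not topics_str or topics_str.strip() == "":
--         return "Array & Hashing"
--
--     topics = [t.strip() for t in topics_str.split(",")]
--     topics_lower = [t.lower() for t in topics]
--
--     # Priority mapping based on existing JSON structure
--     if any("database" in t for t in topics_lower):
--         return "Database"
--     elif any("tree" in t or "binary tree" in t or "bst" in t for t in topics_lower):
--         return "Tree"
--     elif any(
--         "graph" in t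
--         or "dfs" in t
--         or "depth-first" in t
--         or "bfs" in t
--         or "breadth-first" in t
--         or "union find" in t
--         for t in topics_lower
--     ):
--         return "Graph Traversal"
--     elif any(
--         "dynamic programming" in t or "dp" in t or "memoization" in t
--         for t in topics_lower
--     ):
--         return "Dynamic Programming"
--     elif any("backtracking" in t for t in topics_lower):
--         return "Backtracking"
--     elif any("sliding window" in t for t in topics_lower):
--         return "Sliding Window"
--     elif any("binary search" in t for t in topics_lower):
--         return "Binary Search"
--     elif any("heap" in t or "priority queue" in t for t in topics_lower):
--         return "Heap (Priority Queue)"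
--     elif any("stack" in t or "monotonic stack" in t for t in topics_lower):
--         return "Stack"
--     elif any("linked list" in t for t in topics_lower):
--         return "Linked List"
--     elif any("trie" in t or "prefix tree" in t for t in topics_lower):
--         return "Trie"
--     elif any("bit manipulation" in t or "bit" in t for t in topics_lower):
--         return "Bit Manipulation"
--     elif any("greedy" in t for t in topics_lower):
--         return "Greedy"
--     elif any(
--         "math" in t or "geometry" in t or "number theory" in t or "combinatorics" in t
--         for t in topics_lower
--     ):
--         return "Math & Geometry"
--     elif any("two pointers" in t for t in topics_lower):
--         return "Two Pointers"
--     elif any("intervals" in t for t in topics_lower):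
--         return "Intervals"
--     elif any("topological" in t for t in topics_lower):
--         return "Topological Sort"
--     elif any("array" in t or "hash table" in t or "hash" in t for t in topics_lower):
--         return "Array & Hashing"
--     elif any("string" in t for t in topics_lower):
--         return "Array & Hashing"
--     else:
--         return "Array & Hashing"  # default
-- ===== SOURCE B (Python) =====
-- # Single-pass minimum-priority selection: scan every topic once against a flat
-- # keyword->priority dict, keep the smallest matching priority, index a label array.
-- LABELS = [
--     "Database", "Tree", "Graph Traversal", "Dynamic Programming", "Backtracking",
--     "Sliding Window", "Binary Search", "Heap (Priority Queue)", "Stack",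
--     "Linked List", "Trie", "Bit Manipulation", "Greedy", "Math & Geometry",
--     "Two Pointers", "Intervals", "Topological Sort", "Array & Hashing",
--     "Array & Hashing",
-- ]
--
-- KEYWORD_PRIORITY = {
--     "database": 0,
--     "tree": 1, "binary tree": 1, "bst": 1,
--     "graph": 2, "dfs": 2, "depth-first": 2, "bfs": 2, "breadth-first": 2, "union find": 2,
--     "dynamic programming": 3, "dp": 3, "memoization": 3,
--     "backtracking": 4,
--     "sliding window": 5,
--     "binary search": 6,
--     "heap": 7, "priority queue": 7,
--     "stack": 8, "monotonic stack": 8,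
--     "linked list": 9,
--     "trie": 10, "prefix tree": 10,
--     "bit manipulation": 11, "bit": 11,
--     "greedy": 12,
--     "math": 13, "geometry": 13, "number theory": 13, "combinatorics": 13,
--     "two pointers": 14,
--     "intervals": 15,
--     "topological": 16,
--     "array": 17, "hash table": 17, "hash": 17,
--     "string": 18,
-- }
--
--
-- def map_topics_to_category(topics_str):
--     """Map Topics string to JSON category format."""
--     if not topics_str or topics_str.strip() == "":
--         return "Array & Hashing"
--     best = len(LABELS)
--     for raw in topics_str.split(","):
--         t = raw.strip().lower()
--         for kw, pri in KEYWORD_PRIORITY.items():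
--             if pri < best and kw in t:
--                 best = pri
--     return LABELS[best] if best < len(LABELS) else "Array & Hashing"
-- ===== Notes on version B (the rewrite author's own statement) =====
-- stated objective: alternative
-- what changed: Replaces the 18-branch elif chain (one short-circuiting pass per rule over all topics) by a single pass over the topics that accumulates the minimum matching priority from a flat keyword-to-priority dict and then indexes a label array once.
import Mathlib
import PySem

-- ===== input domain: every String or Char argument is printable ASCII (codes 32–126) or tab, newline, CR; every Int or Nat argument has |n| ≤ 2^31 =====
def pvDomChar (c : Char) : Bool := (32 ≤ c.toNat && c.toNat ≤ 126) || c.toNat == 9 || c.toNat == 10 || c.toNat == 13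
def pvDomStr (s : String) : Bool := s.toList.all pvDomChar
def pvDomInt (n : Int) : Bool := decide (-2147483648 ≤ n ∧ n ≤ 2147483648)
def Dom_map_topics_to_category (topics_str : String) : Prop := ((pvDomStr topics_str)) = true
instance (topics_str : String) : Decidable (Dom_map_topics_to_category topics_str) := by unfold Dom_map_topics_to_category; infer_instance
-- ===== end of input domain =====

-- B replaces A's 18-branch elif chain by a single pass over the topics accumulating the minimum matching priority from a flat keyword->priority dict, then one label-array lookup (alternative decomposition).


-- ===== PORT A =====
def map_topics_to_category (topics_str : String) : String :=
  if topics_str = "" ∨ PySem.Str.strip topics_str = "" then "Array & Hashing"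
  else
    let topics := ((PySem.Str.split? topics_str ",").getD []).map (fun t => PySem.Str.strip t)
    let topics_lower := topics.map (fun t => PySem.Str.lower t)
    (
     if topics_lower.any (fun t => PySem.Str.isIn "database" t) then "Database"
     else if topics_lower.any (fun t => PySem.Str.isIn "tree" t || PySem.Str.isIn "binary tree" t || PySem.Str.isIn "bst" t) then "Tree"
     else if topics_lower.any (fun t => PySem.Str.isIn "graph" t || PySem.Str.isIn "dfs" t || PySem.Str.isIn "depth-first" t || PySem.Str.isIn "bfs" t || PySem.Str.isIn "breadth-first" t || PySem.Str.isIn "union find" t) then "Graph Traversal"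
     else if topics_lower.any (fun t => PySem.Str.isIn "dynamic programming" t || PySem.Str.isIn "dp" t || PySem.Str.isIn "memoization" t) then "Dynamic Programming"
     else if topics_lower.any (fun t => PySem.Str.isIn "backtracking" t) then "Backtracking"
     else if topics_lower.any (fun t => PySem.Str.isIn "sliding window" t) then "Sliding Window"
     else if topics_lower.any (fun t => PySem.Str.isIn "binary search" t) then "Binary Search"
     else if topics_lower.any (fun t => PySem.Str.isIn "heap" t || PySem.Str.isIn "priority queue" t) then "Heap (Priority Queue)"
     else if topics_lower.any (fun t => PySem.Str.isIn "stack" t || PySem.Str.isIn "monotonic stack" t) then "Stack"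
     else if topics_lower.any (fun t => PySem.Str.isIn "linked list" t) then "Linked List"
     else if topics_lower.any (fun t => PySem.Str.isIn "trie" t || PySem.Str.isIn "prefix tree" t) then "Trie"
     else if topics_lower.any (fun t => PySem.Str.isIn "bit manipulation" t || PySem.Str.isIn "bit" t) then "Bit Manipulation"
     else if topics_lower.any (fun t => PySem.Str.isIn "greedy" t) then "Greedy"
     else if topics_lower.any (fun t => PySem.Str.isIn "math" t || PySem.Str.isIn "geometry" t || PySem.Str.isIn "number theory" t || PySem.Str.isIn "combinatorics" t) then "Math & Geometry"
     else if topics_lower.any (fun t => PySem.Str.isIn "two pointers" t) then "Two Pointers"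
     else if topics_lower.any (fun t => PySem.Str.isIn "intervals" t) then "Intervals"
     else if topics_lower.any (fun t => PySem.Str.isIn "topological" t) then "Topological Sort"
     else if topics_lower.any (fun t => PySem.Str.isIn "array" t || PySem.Str.isIn "hash table" t || PySem.Str.isIn "hash" t) then "Array & Hashing"
     else if topics_lower.any (fun t => PySem.Str.isIn "string" t) then "Array & Hashing"
     else "Array & Hashing")

-- ===== PORT B =====
def pvLabels : List String :=
  [ "Database", "Tree", "Graph Traversal", "Dynamic Programming", "Backtracking", "Sliding Window", "Binary Search", "Heap (Priority Queue)", "Stack", "Linked List", "Trie", "Bit Manipulation", "Greedy", "Math & Geometry", "Two Pointers", "Intervals", "Topological Sort", "Array & Hashing", "Array & Hashing" ]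

-- the KEYWORD_PRIORITY dict of Source B (all keys distinct), as an insertion-ordered association list
def pvKwPri : List (String × Int) :=
  [
    ("database", 0),
    ("tree", 1), ("binary tree", 1), ("bst", 1),
    ("graph", 2), ("dfs", 2), ("depth-first", 2), ("bfs", 2), ("breadth-first", 2), ("union find", 2),
    ("dynamic programming", 3), ("dp", 3), ("memoization", 3),
    ("backtracking", 4),
    ("sliding window", 5),
    ("binary search", 6),
    ("heap", 7), ("priority queue", 7),
    ("stack", 8), ("monotonic stack", 8),
    ("linked list", 9),
    ("trie", 10), ("prefix tree", 10),
    ("bit manipulation", 11), ("bit", 11),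
    ("greedy", 12),
    ("math", 13), ("geometry", 13), ("number theory", 13), ("combinatorics", 13),
    ("two pointers", 14),
    ("intervals", 15),
    ("topological", 16),
    ("array", 17), ("hash table", 17), ("hash", 17),
    ("string", 18) ]

def map_topics_to_category_alt (topics_str : String) : String :=
  if topics_str = "" ∨ PySem.Str.strip topics_str = "" then "Array & Hashing"
  else
    let best := ((PySem.Str.split? topics_str ",").getD []).foldl
      (fun best raw =>
        pvKwPri.foldl
          (fun b p => if p.2 < b ∧ PySem.Str.isIn p.1 (PySem.Str.lower (PySem.Str.strip raw)) then p.2 else b)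
          best)
      (19 : Int)
    if best < 19 then (PySem.List.pyGet? pvLabels best).getD "Array & Hashing" else "Array & Hashing"

-- ===== PRECONDITION & SPEC =====
def Spec_map_topics_to_category (topics_str : String) (out : String) : Prop := out = map_topics_to_category_alt topics_str
instance (topics_str : String) (out : String) : Decidable (Spec_map_topics_to_category topics_str out) := by unfold Spec_map_topics_to_category; infer_instance

-- ===== CLAIM (what is proved, stated in full; the proofs are below) =====
def Claim_equal_map_topics_to_category : Prop := ∀ (topics_str : String), Dom_map_topics_to_category topics_str → Spec_map_topics_to_category topics_str (map_topics_to_category topics_str)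

-- ===== LEMMAS AND PROOFS =====

-- A's rules in chain order; flattening them with their indices gives exactly pvKwPri
def pvRules : List (List String) :=
  [
    ["database"],
    ["tree", "binary tree", "bst"],
    ["graph", "dfs", "depth-first", "bfs", "breadth-first", "union find"],
    ["dynamic programming", "dp", "memoization"],
    ["backtracking"],
    ["sliding window"],
    ["binary search"],
    ["heap", "priority queue"],
    ["stack", "monotonic stack"],
    ["linked list"],
    ["trie", "prefix tree"],
    ["bit manipulation", "bit"],
    ["greedy"],
    ["math", "geometry", "number theory", "combinatorics"],
    ["two pointers"],
    ["intervals"],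
    ["topological"],
    ["array", "hash table", "hash"],
    ["string"] ]

def pvMatches (r : List String) (topics : List String) : Bool :=
  topics.any (fun t => r.any (fun kw => PySem.Str.isIn kw t))

-- index of the first rule matched by some topic (= number of rules if none)
def pvFi : List (List String) → List String → Int
  | [], _ => 0
  | r :: rest, topics => if pvMatches r topics then 0 else 1 + pvFi rest topics

def pvFlat : Int → List (List String) → List (String × Int)
  | _, [] => []
  | k, r :: rest => r.map (fun kw => (kw, k)) ++ pvFlat (k + 1) rest

theorem pvKwPri_eq_flat : pvKwPri = pvFlat 0 pvRules := by decide

theorem pvFi_nonneg (rs : List (List String)) (topics : List String) : 0 ≤ pvFi rs topics := by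
  induction rs with
  | nil => simp [pvFi]
  | cons r rest ih => simp only [pvFi]; split <;> omega

theorem pvFi_le (rs : List (List String)) (topics : List String) : pvFi rs topics ≤ (rs.length : Int) := by
  induction rs with
  | nil => simp [pvFi]
  | cons r rest ih => simp only [pvFi, List.length_cons]; split <;> push_cast <;> omega

theorem pvFi_cons_topic (rs : List (List String)) (t : String) (ts : List String) :
    pvFi rs (t :: ts) = min (pvFi rs [t]) (pvFi rs ts) := by
  induction rs with
  | nil => simp [pvFi]
  | cons r rest ih =>
    have e1 : pvMatches r (t :: ts) = ((r.any fun kw => PySem.Str.isIn kw t) || pvMatches r ts) := by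
      simp [pvMatches]
    have e2 : pvMatches r [t] = (r.any fun kw => PySem.Str.isIn kw t) := by
      simp [pvMatches]
    have n1 := pvFi_nonneg rest [t]
    have n2 := pvFi_nonneg rest ts
    simp only [pvFi, e1, e2, ih]
    cases h1 : (r.any fun kw => PySem.Str.isIn kw t) <;> cases h2 : pvMatches r ts <;>
      simp only [Bool.or_true, Bool.or_false, Bool.false_eq_true, if_true, if_false] <;>
      omega

theorem inner_group (t : String) (k : Int) (r : List String) :
    ∀ a : Int,
      (r.map (fun kw => (kw, k))).foldl (fun b p => if p.2 < b ∧ PySem.Str.isIn p.1 t then p.2 else b) a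
        = if r.any (fun kw => PySem.Str.isIn kw t) then min k a else a := by
  induction r with
  | nil => intro a; simp
  | cons kw rest ih =>
    intro a
    by_cases h : PySem.Str.isIn kw t = true
    · simp only [List.map_cons, List.foldl_cons, List.any_cons, h, and_true,
        Bool.true_or, if_true, ih]
      split_ifs <;> omega
    · rw [Bool.not_eq_true] at h
      simp only [List.map_cons, List.foldl_cons, List.any_cons, h, Bool.false_eq_true, and_false,
        if_false, Bool.false_or, ih]

theorem inner_flat (t : String) :
    ∀ (rs : List (List String)) (k a : Int),
      (pvFlat k rs).foldl (fun b p => if p.2 < b ∧ PySem.Str.isIn p.1 t then p.2 else b) a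
        = if pvFi rs [t] < (rs.length : Int) then min a (k + pvFi rs [t]) else a := by
  intro rs
  induction rs with
  | nil => intro k a; simp [pvFlat, pvFi]
  | cons r rest ih =>
    intro k a
    have e2 : pvMatches r [t] = (r.any fun kw => PySem.Str.isIn kw t) := by
      simp [pvMatches]
    simp only [pvFlat, List.foldl_append, inner_group, pvFi, e2, List.length_cons]
    have h0 := pvFi_nonneg rest [t]
    have h1 := pvFi_le rest [t]
    by_cases h : (r.any fun kw => PySem.Str.isIn kw t) = true
    · simp only [h, if_true, ih]
      push_cast
      split_ifs <;> omega
    · rw [Bool.not_eq_true] at h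
      simp only [h, Bool.false_eq_true, if_false, ih]
      push_cast
      split_ifs <;> omega

theorem outer_fold (f : String → String) :
    ∀ (raws : List String) (a : Int),
      raws.foldl
          (fun best raw =>
            pvKwPri.foldl (fun b p => if p.2 < b ∧ PySem.Str.isIn p.1 (f raw) then p.2 else b) best) a
        = if pvFi pvRules (raws.map f) < 19 then min a (pvFi pvRules (raws.map f)) else a := by
  intro raws
  induction raws with
  | nil =>
    intro a
    have h : pvFi pvRules ([] : List String) = 19 := by decide
    simp [h]
  | cons raw ts ih =>
    intro a
    have hlen : ((pvRules.length : Nat) : Int) = 19 := by decide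
    have hstep : pvKwPri.foldl (fun b p => if p.2 < b ∧ PySem.Str.isIn p.1 (f raw) then p.2 else b) a
        = if pvFi pvRules [f raw] < 19 then min a (pvFi pvRules [f raw]) else a := by
      rw [pvKwPri_eq_flat, inner_flat, hlen]
      simp
    simp only [List.foldl_cons, hstep, ih, List.map_cons, pvFi_cons_topic pvRules (f raw) (ts.map f)]
    have h0 := pvFi_nonneg pvRules [f raw]
    have h1 := pvFi_nonneg pvRules (ts.map f)
    split_ifs <;> omega

theorem chain_eq (L : List String) :
    (
     if L.any (fun t => PySem.Str.isIn "database" t) then "Database"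
     else if L.any (fun t => PySem.Str.isIn "tree" t || PySem.Str.isIn "binary tree" t || PySem.Str.isIn "bst" t) then "Tree"
     else if L.any (fun t => PySem.Str.isIn "graph" t || PySem.Str.isIn "dfs" t || PySem.Str.isIn "depth-first" t || PySem.Str.isIn "bfs" t || PySem.Str.isIn "breadth-first" t || PySem.Str.isIn "union find" t) then "Graph Traversal"
     else if L.any (fun t => PySem.Str.isIn "dynamic programming" t || PySem.Str.isIn "dp" t || PySem.Str.isIn "memoization" t) then "Dynamic Programming"
     else if L.any (fun t => PySem.Str.isIn "backtracking" t) then "Backtracking"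
     else if L.any (fun t => PySem.Str.isIn "sliding window" t) then "Sliding Window"
     else if L.any (fun t => PySem.Str.isIn "binary search" t) then "Binary Search"
     else if L.any (fun t => PySem.Str.isIn "heap" t || PySem.Str.isIn "priority queue" t) then "Heap (Priority Queue)"
     else if L.any (fun t => PySem.Str.isIn "stack" t || PySem.Str.isIn "monotonic stack" t) then "Stack"
     else if L.any (fun t => PySem.Str.isIn "linked list" t) then "Linked List"
     else if L.any (fun t => PySem.Str.isIn "trie" t || PySem.Str.isIn "prefix tree" t) then "Trie"
     else if L.any (fun t => PySem.Str.isIn "bit manipulation" t || PySem.Str.isIn "bit" t) then "Bit Manipulation"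
     else if L.any (fun t => PySem.Str.isIn "greedy" t) then "Greedy"
     else if L.any (fun t => PySem.Str.isIn "math" t || PySem.Str.isIn "geometry" t || PySem.Str.isIn "number theory" t || PySem.Str.isIn "combinatorics" t) then "Math & Geometry"
     else if L.any (fun t => PySem.Str.isIn "two pointers" t) then "Two Pointers"
     else if L.any (fun t => PySem.Str.isIn "intervals" t) then "Intervals"
     else if L.any (fun t => PySem.Str.isIn "topological" t) then "Topological Sort"
     else if L.any (fun t => PySem.Str.isIn "array" t || PySem.Str.isIn "hash table" t || PySem.Str.isIn "hash" t) then "Array & Hashing"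
     else if L.any (fun t => PySem.Str.isIn "string" t) then "Array & Hashing"
     else "Array & Hashing") =
    (if pvFi pvRules L < 19 then (PySem.List.pyGet? pvLabels (pvFi pvRules L)).getD "Array & Hashing" else "Array & Hashing") := by
  simp only [pvRules, pvFi, pvMatches, List.any_cons, List.any_nil, Bool.or_false, Bool.or_assoc]
  by_cases c0 : (L.any fun t => PySem.Str.isIn "database" t) = true
  · rw [if_pos c0, if_pos c0]; decide
  rw [if_neg c0, if_neg c0]
  by_cases c1 : (L.any fun t => PySem.Str.isIn "tree" t || (PySem.Str.isIn "binary tree" t || (PySem.Str.isIn "bst" t))) = true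
  · rw [if_pos c1, if_pos c1]; decide
  rw [if_neg c1, if_neg c1]
  by_cases c2 : (L.any fun t => PySem.Str.isIn "graph" t || (PySem.Str.isIn "dfs" t || (PySem.Str.isIn "depth-first" t || (PySem.Str.isIn "bfs" t || (PySem.Str.isIn "breadth-first" t || (PySem.Str.isIn "union find" t)))))) = true
  · rw [if_pos c2, if_pos c2]; decide
  rw [if_neg c2, if_neg c2]
  by_cases c3 : (L.any fun t => PySem.Str.isIn "dynamic programming" t || (PySem.Str.isIn "dp" t || (PySem.Str.isIn "memoization" t))) = true
  · rw [if_pos c3, if_pos c3]; decide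
  rw [if_neg c3, if_neg c3]
  by_cases c4 : (L.any fun t => PySem.Str.isIn "backtracking" t) = true
  · rw [if_pos c4, if_pos c4]; decide
  rw [if_neg c4, if_neg c4]
  by_cases c5 : (L.any fun t => PySem.Str.isIn "sliding window" t) = true
  · rw [if_pos c5, if_pos c5]; decide
  rw [if_neg c5, if_neg c5]
  by_cases c6 : (L.any fun t => PySem.Str.isIn "binary search" t) = true
  · rw [if_pos c6, if_pos c6]; decide
  rw [if_neg c6, if_neg c6]
  by_cases c7 : (L.any fun t => PySem.Str.isIn "heap" t || (PySem.Str.isIn "priority queue" t)) = true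
  · rw [if_pos c7, if_pos c7]; decide
  rw [if_neg c7, if_neg c7]
  by_cases c8 : (L.any fun t => PySem.Str.isIn "stack" t || (PySem.Str.isIn "monotonic stack" t)) = true
  · rw [if_pos c8, if_pos c8]; decide
  rw [if_neg c8, if_neg c8]
  by_cases c9 : (L.any fun t => PySem.Str.isIn "linked list" t) = true
  · rw [if_pos c9, if_pos c9]; decide
  rw [if_neg c9, if_neg c9]
  by_cases c10 : (L.any fun t => PySem.Str.isIn "trie" t || (PySem.Str.isIn "prefix tree" t)) = true
  · rw [if_pos c10, if_pos c10]; decide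
  rw [if_neg c10, if_neg c10]
  by_cases c11 : (L.any fun t => PySem.Str.isIn "bit manipulation" t || (PySem.Str.isIn "bit" t)) = true
  · rw [if_pos c11, if_pos c11]; decide
  rw [if_neg c11, if_neg c11]
  by_cases c12 : (L.any fun t => PySem.Str.isIn "greedy" t) = true
  · rw [if_pos c12, if_pos c12]; decide
  rw [if_neg c12, if_neg c12]
  by_cases c13 : (L.any fun t => PySem.Str.isIn "math" t || (PySem.Str.isIn "geometry" t || (PySem.Str.isIn "number theory" t || (PySem.Str.isIn "combinatorics" t)))) = true
  · rw [if_pos c13, if_pos c13]; decide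
  rw [if_neg c13, if_neg c13]
  by_cases c14 : (L.any fun t => PySem.Str.isIn "two pointers" t) = true
  · rw [if_pos c14, if_pos c14]; decide
  rw [if_neg c14, if_neg c14]
  by_cases c15 : (L.any fun t => PySem.Str.isIn "intervals" t) = true
  · rw [if_pos c15, if_pos c15]; decide
  rw [if_neg c15, if_neg c15]
  by_cases c16 : (L.any fun t => PySem.Str.isIn "topological" t) = true
  · rw [if_pos c16, if_pos c16]; decide
  rw [if_neg c16, if_neg c16]
  by_cases c17 : (L.any fun t => PySem.Str.isIn "array" t || (PySem.Str.isIn "hash table" t || (PySem.Str.isIn "hash" t))) = true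
  · rw [if_pos c17, if_pos c17]; decide
  rw [if_neg c17, if_neg c17]
  by_cases c18 : (L.any fun t => PySem.Str.isIn "string" t) = true
  · rw [if_pos c18, if_pos c18]; decide
  rw [if_neg c18, if_neg c18]
  decide

-- ===== VERDICT (by name: the statement is the Claim_ definition above) =====
theorem map_topics_to_category_spec : Claim_equal_map_topics_to_category := by
  intro s _
  unfold Spec_map_topics_to_category map_topics_to_category map_topics_to_category_alt
  by_cases h : s = "" ∨ PySem.Str.strip s = ""
  · rw [if_pos h, if_pos h]
  · rw [if_neg h, if_neg h]
    dsimp only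
    rw [outer_fold (fun raw => PySem.Str.lower (PySem.Str.strip raw))]
    rw [List.map_map]
    simp only [Function.comp_def]
    refine Eq.trans (chain_eq (List.map (fun x => PySem.Str.lower (PySem.Str.strip x)) ((PySem.Str.split? s ",").getD []))) ?_
    have h0 := pvFi_nonneg pvRules (((PySem.Str.split? s ",").getD []).map (fun x => PySem.Str.lower (PySem.Str.strip x)))
    by_cases hlt : pvFi pvRules (((PySem.Str.split? s ",").getD []).map (fun x => PySem.Str.lower (PySem.Str.strip x))) < 19
    · have hmin : min (19 : Int) (pvFi pvRules (((PySem.Str.split? s ",").getD []).map (fun x => PySem.Str.lower (PySem.Str.strip x)))) = pvFi pvRules (((PySem.Str.split? s ",").getD []).map (fun x => PySem.Str.lower (PySem.Str.strip x))) := by omega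
      simp only [if_pos hlt, hmin]
    · simp only [if_neg hlt, if_neg (show ¬ (19 : Int) < 19 by norm_num)]
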